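-- pv_equiv track=rewrite | github.com/ats4u/rhythmpress | src/rhythmpress/scripts/rhythmpedia-render-toc.py | normalize_href
-- ===== SOURCE A (Python) =====
-- def normalize_href(path_like: str) -> str:
--     """
--     Strict normalization to directory-style:
--       - leading '/'
--       - collapse //, resolve '.' and '..'
--       - enforce trailing '/'
--     """
--     s = (path_like or "").strip().replace("\\", "/")
--     # treat as relative for normalization
--     if s.startswith("/"):
--         s = s[1:]
--
--     parts = []
--     for p in s.split("/"):
--         if not p or p == ".":
--             continue
--         if p == "..":
--             if parts:
--                 parts.pop()
--             continue
--         parts.append(p)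
--
--     joined = "/".join(parts)
--     if joined:
--         return "/" + joined + "/"
--     return "/"  # root special-case
-- ===== SOURCE B (Python) =====
-- def normalize_href(path_like: str) -> str:
--     """Directory-style normalization built as a string in one reverse pass with a
--     skip counter: no segment stack, no pop, no join, no final special case."""
--     s = (path_like or "").strip().replace("\\", "/")
--     if s.startswith("/"):
--         s = s[1:]
--
--     out = ""
--     skip = 0
--     for p in reversed(s.split("/")):
--         if p and p != ".":
--             if p == "..":
--                 skip += 1
--             elif skip:
--                 skip -= 1
--             else:
--                 out = "/" + p + out
--     # leftover skip (leading '..') is simply discarded; empty out yields root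
--     return out + "/"
-- ===== Notes on version B (the rewrite author's own statement) =====
-- stated objective: alternative
-- what changed: Replaces A's forward stack of segments (append, pop on a parent reference, then join and wrap) by a single reverse pass with an integer skip counter that builds the output string directly by prepending each surviving slash-prefixed segment, so there is no segment list, no pop, no join and no empty-result special case.
import Mathlib
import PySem

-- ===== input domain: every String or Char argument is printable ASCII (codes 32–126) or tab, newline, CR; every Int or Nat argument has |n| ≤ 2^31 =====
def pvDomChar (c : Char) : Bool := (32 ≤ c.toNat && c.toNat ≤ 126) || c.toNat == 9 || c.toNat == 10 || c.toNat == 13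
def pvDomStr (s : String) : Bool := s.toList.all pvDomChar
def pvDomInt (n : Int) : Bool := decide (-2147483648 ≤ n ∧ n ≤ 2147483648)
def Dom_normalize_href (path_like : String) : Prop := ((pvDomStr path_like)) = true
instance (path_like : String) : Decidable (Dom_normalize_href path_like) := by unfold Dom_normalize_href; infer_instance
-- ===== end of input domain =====

-- B replaces A's forward segment stack + join + wrap by one reverse pass with a skip
-- counter that builds the output string directly; same cost, different structure.

-- ===== PORT A =====
-- loop body of A: skip empty/'.', pop on '..' (guarded), else append
def pvStepA (parts : List String) (p : String) : List String :=
  if p = "" ∨ p = "." then parts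
  else if p = ".." then (if parts ≠ [] then parts.dropLast else parts)
  else parts ++ [p]

def normalize_href (path_like : String) : String :=
  -- (path_like or "") is the identity on strings ("" stays "")
  let s0 := PySem.Str.replace (PySem.Str.strip path_like) "\\" "/"
  let s := if PySem.Str.startswith s0 "/" then PySem.Str.slice s0 (some 1) none else s0
  let parts := ((PySem.Str.split? s "/").getD []).foldl pvStepA []
  let joined := PySem.Str.join "/" parts
  if joined ≠ "" then "/" ++ joined ++ "/" else "/"

-- ===== PORT B =====
-- B's loop: 'for p in reversed(segs)', real segments cancelled by the skip counter,
-- surviving ones prepended to the output string as "/" + p + out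
def pvLoopB : List String → Nat → String → String
  | [], _, out => out
  | p :: rl, skip, out =>
    if p ≠ "" ∧ p ≠ "." then
      if p = ".." then pvLoopB rl (skip + 1) out
      else if 0 < skip then pvLoopB rl (skip - 1) out
      else pvLoopB rl skip ("/" ++ p ++ out)
    else pvLoopB rl skip out

def normalize_href_alt (path_like : String) : String :=
  let s0 := PySem.Str.replace (PySem.Str.strip path_like) "\\" "/"
  let s := if PySem.Str.startswith s0 "/" then PySem.Str.slice s0 (some 1) none else s0
  pvLoopB (((PySem.Str.split? s "/").getD []).reverse) 0 "" ++ "/"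

-- ===== PRECONDITION & SPEC =====
def Spec_normalize_href (path_like : String) (out : String) : Prop := out = normalize_href_alt path_like
instance (path_like : String) (out : String) : Decidable (Spec_normalize_href path_like out) := by unfold Spec_normalize_href; infer_instance

-- ===== CLAIM (what is proved, stated in full; the proofs are below) =====
def Claim_equal_normalize_href : Prop := ∀ (path_like : String), Dom_normalize_href path_like → Spec_normalize_href path_like (normalize_href path_like)

-- ===== LEMMAS AND PROOFS =====

-- pure (non-accumulator) form of B's loop: final skip count and survivors in ORIGINAL order
def pvB0 : List String → Nat → Nat × List String
  | [], k => (k, [])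
  | p :: rl, k =>
    if p = "" ∨ p = "." then pvB0 rl k
    else if p = ".." then pvB0 rl (k + 1)
    else if 0 < k then pvB0 rl (k - 1)
    else ((pvB0 rl 0).1, (pvB0 rl 0).2 ++ [p])

-- glue a segment list into B's output shape: "/a" ++ "/b" ++ …
def pvGlue (parts : List String) : String :=
  parts.foldr (fun p acc => "/" ++ p ++ acc) ""

-- drop the last k elements (Python's guarded pop, iterated)
def pvPopN (k : Nat) (xs : List String) : List String := xs.take (xs.length - k)

theorem pvGlue_append (xs : List String) (p : String) :
    pvGlue (xs ++ [p]) = pvGlue xs ++ ("/" ++ p) := by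
  induction xs with
  | nil => simp [pvGlue, String.append_empty, String.empty_append]
  | cons q xs ih => simp [pvGlue] at ih ⊢; rw [ih]; simp [String.append_assoc]

theorem pvLoopB_eq (rl : List String) : ∀ (k : Nat) (out : String),
    pvLoopB rl k out = pvGlue (pvB0 rl k).2 ++ out := by
  induction rl with
  | nil => intro k out; simp [pvLoopB, pvB0, pvGlue, String.empty_append]
  | cons p rl ih =>
    intro k out
    simp only [pvLoopB, pvB0]
    by_cases h1 : p = "" ∨ p = "."
    · rw [if_neg (by tauto), if_pos h1]; exact ih k out
    · rw [if_pos (by tauto), if_neg h1]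
      by_cases h2 : p = ".."
      · simp only [if_pos h2]; exact ih (k + 1) out
      · simp only [if_neg h2]
        by_cases h3 : 0 < k
        · simp only [if_pos h3]; exact ih (k - 1) out
        · have hk : k = 0 := by omega
          subst hk
          simp only [if_neg h3]
          rw [ih 0 ("/" ++ p ++ out), pvGlue_append]
          simp [String.append_assoc]

theorem pvPopN_zero (xs : List String) : pvPopN 0 xs = xs := by
  simp [pvPopN]

theorem pvPopN_dropLast (k : Nat) (xs : List String) :
    pvPopN k xs.dropLast = pvPopN (k + 1) xs := by
  simp only [pvPopN, List.dropLast_eq_take, List.length_take, List.take_take]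
  congr 1
  omega

theorem pvPopN_append_singleton (k : Nat) (hk : 0 < k) (xs : List String) (p : String) :
    pvPopN k (xs ++ [p]) = pvPopN (k - 1) xs := by
  simp only [pvPopN, List.length_append, List.length_cons, List.length_nil]
  rw [List.take_append_of_le_length (by omega)]
  congr 1
  omega

theorem pvB0_foldl (rl : List String) : ∀ (k : Nat) (parts : List String),
    pvPopN k (rl.reverse.foldl pvStepA parts) =
      pvPopN (pvB0 rl k).1 parts ++ (pvB0 rl k).2 := by
  induction rl with
  | nil => intro k parts; simp [pvB0]
  | cons p rl ih =>
    intro k parts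
    simp only [List.reverse_cons, List.foldl_append, List.foldl_cons, List.foldl_nil, pvB0]
    by_cases h1 : p = "" ∨ p = "."
    · simp only [pvStepA, if_pos h1]
      exact ih k parts
    · by_cases h2 : p = ".."
      · simp only [pvStepA, if_neg h1, if_pos h2]
        have hdl : (if rl.reverse.foldl pvStepA parts ≠ [] then (rl.reverse.foldl pvStepA parts).dropLast
            else rl.reverse.foldl pvStepA parts) = (rl.reverse.foldl pvStepA parts).dropLast := by
          split_ifs with h
          · rfl
          · simp at h; simp [h]
        rw [hdl, pvPopN_dropLast]
        exact ih (k + 1) parts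
      · simp only [pvStepA, if_neg h1, if_neg h2]
        by_cases h3 : 0 < k
        · rw [if_pos h3, pvPopN_append_singleton k h3]
          exact ih (k - 1) parts
        · rw [if_neg h3]
          have hk0 : k = 0 := by omega
          subst hk0
          have : pvPopN 0 (rl.reverse.foldl pvStepA parts ++ [p]) =
              rl.reverse.foldl pvStepA parts ++ [p] := pvPopN_zero _
          rw [this, ← List.append_assoc]
          congr 1
          have := ih 0 parts
          rw [pvPopN_zero] at this
          exact this

-- the core: B's reverse pass builds exactly pvGlue of A's stack
theorem pvCore (segs : List String) :
    pvLoopB segs.reverse 0 "" = pvGlue (segs.foldl pvStepA []) := by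
  rw [pvLoopB_eq, String.append_empty]
  have h := pvB0_foldl segs.reverse 0 []
  rw [List.reverse_reverse, pvPopN_zero] at h
  rw [h]
  simp [pvPopN]

-- every string A's stack holds is a segment it appended, hence nonempty
theorem pvStack_ne (segs : List String) : ∀ (parts : List String),
    (∀ x ∈ parts, x ≠ "") → ∀ x ∈ segs.foldl pvStepA parts, x ≠ "" := by
  induction segs with
  | nil => intro parts h; simpa using h
  | cons p segs ih =>
    intro parts h
    simp only [List.foldl_cons]
    apply ih
    intro x hx
    unfold pvStepA at hx
    split_ifs at hx with h1 h2 h3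
    · exact h x hx
    · exact h x (List.dropLast_subset _ hx)
    · exact h x hx
    · rcases List.mem_append.mp hx with hx | hx
      · exact h x hx
      · simp at hx; subst hx; tauto

-- A's join-and-wrap of a list of nonempty segments is pvGlue followed by "/"
theorem pvJoinGlue (parts : List String) (h : ∀ x ∈ parts, x ≠ "") :
    (if PySem.Str.join "/" parts ≠ "" then "/" ++ PySem.Str.join "/" parts ++ "/"
     else "/") = pvGlue parts ++ "/" := by
  cases parts with
  | nil =>
    rw [if_neg (by
      simp only [ne_eq, not_not]
      apply String.toList_inj.mp
      simp [PySem.Str.toList_join, PySem.Chars.join_nil])]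
    simp [pvGlue, String.empty_append]
  | cons p rest =>
    have hne : PySem.Str.join "/" (p :: rest) ≠ "" := by
      intro hc
      have := congrArg String.toList hc
      rw [PySem.Str.toList_join] at this
      cases rest with
      | nil =>
        rw [List.map_cons, List.map_nil, PySem.Chars.join_singleton] at this
        exact h p (by simp) (String.toList_inj.mp (by simpa using this))
      | cons q rest' =>
        rw [List.map_cons, List.map_cons, PySem.Chars.join_cons_cons] at this
        simp at this
    rw [if_pos hne]
    congr 1
    -- "/" ++ join "/" (p :: rest) = pvGlue (p :: rest)
    clear hne
    induction rest generalizing p with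
    | nil =>
      apply String.toList_inj.mp
      simp [PySem.Str.toList_join, PySem.Chars.join_singleton, pvGlue,
        String.toList_append, String.append_empty]
    | cons q rest' ih =>
      have hq : ∀ x ∈ q :: rest', x ≠ "" := fun x hx => h x (by simp at hx ⊢; tauto)
      apply String.toList_inj.mp
      have hl := congrArg String.toList (ih q hq)
      simp only [pvGlue, List.foldr_cons] at hl ⊢
      simp only [String.toList_append, PySem.Str.toList_join, List.map_cons,
        PySem.Chars.join_cons_cons] at hl ⊢
      rw [← hl]
      simp

-- join-and-wrap vs glue, specialised to A's stack (helps the final unification)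
theorem pvFinal (segs : List String) :
    (if PySem.Str.join "/" (segs.foldl pvStepA []) ≠ "" then
       "/" ++ PySem.Str.join "/" (segs.foldl pvStepA []) ++ "/" else "/")
    = pvGlue (segs.foldl pvStepA []) ++ "/" :=
  pvJoinGlue _ (pvStack_ne _ [] (by simp))

-- ===== VERDICT (by name: the statement is the Claim_ definition above) =====
theorem normalize_href_spec : Claim_equal_normalize_href := by
  intro path_like _
  unfold Spec_normalize_href normalize_href normalize_href_alt
  simp only [pvCore]
  generalize ((PySem.Str.split? (if PySem.Str.startswith (PySem.Str.replace (PySem.Str.strip path_like) "\\" "/") "/" = true then PySem.Str.slice (PySem.Str.replace (PySem.Str.strip path_like) "\\" "/") (some 1) none else PySem.Str.replace (PySem.Str.strip path_like) "\\" "/") "/").getD []) = segs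
  exact pvFinal segs
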